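-- pv_equiv track=rewrite | github.com/shyamjiyadav28/ShyamjiYadav_2410030344_IILM-GN | Count Even Letters.py | count
-- ===== SOURCE A (Python) =====
-- def count(s):
--     freq = {}
--
--     for ch in s:
--         freq[ch] = freq.get(ch, 0) + 1
--
--     ans = 0
--     for val in freq.values():
--         if val % 2 == 0:
--             ans += 1
--
--     return ans
-- ===== SOURCE B (Python) =====
-- def count(s):
--     seen = set()
--     parity = set()
--     for ch in s:
--         seen.add(ch)
--         if ch in parity:
--             parity.discard(ch)
--         else:
--             parity.add(ch)
--     return len(seen) - len(parity)
-- ===== Notes on version B (the rewrite author's own statement) =====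
-- stated objective: alternative
-- what changed: Replaces the frequency dictionary plus count-then-filter scan over values by a single pass maintaining two sets (all chars seen, and chars seen an odd number of times via a parity toggle), returning len(seen) - len(parity); no counts are ever stored.
import Mathlib
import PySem

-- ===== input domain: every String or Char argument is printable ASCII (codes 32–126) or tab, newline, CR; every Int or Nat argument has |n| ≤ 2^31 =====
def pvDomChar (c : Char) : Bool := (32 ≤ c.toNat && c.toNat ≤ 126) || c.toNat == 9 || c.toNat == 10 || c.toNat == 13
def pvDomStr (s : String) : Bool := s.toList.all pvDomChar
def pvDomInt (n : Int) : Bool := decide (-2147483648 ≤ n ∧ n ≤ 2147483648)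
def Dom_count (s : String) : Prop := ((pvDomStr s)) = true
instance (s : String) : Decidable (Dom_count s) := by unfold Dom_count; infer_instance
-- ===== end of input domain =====

-- B: one pass keeping two sets (seen, and odd-parity chars); answer = len(seen) - len(parity). No counts stored.

-- ===== PORT A =====
def count (s : String) : Int :=
  let freq := s.toList.foldl (fun (d : PySem.Dict Char Int) ch => d.insert ch (d.getD ch 0 + 1)) PySem.Dict.empty
  freq.values.foldl (fun ans v => if PySem.Int.mod v 2 == 0 then ans + 1 else ans) 0

-- ===== PORT B =====
def count_alt (s : String) : Int :=
  let st := s.toList.foldl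
    (fun (st : PySem.Set Char × PySem.Set Char) ch =>
      (PySem.Set.add st.1 ch,
       if PySem.Set.contains st.2 ch then PySem.Set.discard st.2 ch else PySem.Set.add st.2 ch))
    (PySem.Set.empty, PySem.Set.empty)
  (PySem.Set.len st.1) - (PySem.Set.len st.2)

-- ===== PRECONDITION & SPEC =====
def Spec_count (s : String) (out : Int) : Prop := out = count_alt s
instance (s : String) (out : Int) : Decidable (Spec_count s out) := by unfold Spec_count; infer_instance

-- ===== CLAIM (what is proved, stated in full; the proofs are below) =====
def Claim_equal_count : Prop := ∀ (s : String), Dom_count s → Spec_count s (count s)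

-- ===== LEMMAS AND PROOFS =====

-- B's parity set: membership after the fold is XOR of initial membership and oddness of the count.
theorem parity_invariant (l : List Char) (p : PySem.Set Char) (hp : p.Nodup) :
    (l.foldl (fun (q : PySem.Set Char) ch =>
        if PySem.Set.contains q ch then PySem.Set.discard q ch else PySem.Set.add q ch) p).Nodup ∧
    ∀ c, c ∈ (l.foldl (fun (q : PySem.Set Char) ch =>
        if PySem.Set.contains q ch then PySem.Set.discard q ch else PySem.Set.add q ch) p) ↔
      ((c ∈ p) ↔ l.count c % 2 = 0) := by
  induction l generalizing p with
  | nil => simp [hp]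
  | cons a t ih =>
    simp only [List.foldl_cons]
    by_cases ha : a ∈ p
    · have hd : PySem.Set.contains p a = true := (PySem.Set.contains_iff p a).mpr ha
      rw [hd, if_pos rfl]
      obtain ⟨hn, hm⟩ := ih (PySem.Set.discard p a) (PySem.Set.nodup_discard p a hp)
      refine ⟨hn, fun c => ?_⟩
      rw [hm c, PySem.Set.mem_discard]
      by_cases hc : c = a
      · subst hc
        simp [ha]
        omega
      · simp [Ne.symm hc]
        tauto
    · have hd : PySem.Set.contains p a = false := by
        by_contra h
        exact ha ((PySem.Set.contains_iff p a).mp (by simpa using h))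
      rw [hd, if_neg (by simp)]
      obtain ⟨hn, hm⟩ := ih (PySem.Set.add p a) (PySem.Set.nodup_add p a hp)
      refine ⟨hn, fun c => ?_⟩
      rw [hm c, PySem.Set.mem_add]
      by_cases hc : c = a
      · subst hc
        simp [ha]
        omega
      · simp [Ne.symm hc]
        tauto

-- B's value in closed form: distinct chars minus distinct odd-count chars.
theorem count_alt_closed (s : String) :
    count_alt s = ((PySem.Set.ofList s.toList).length : Int)
      - (((PySem.Set.ofList s.toList).filter (fun c => decide (s.toList.count c % 2 = 1))).length : Int) := by
  unfold count_alt
  set l := s.toList with hl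
  rw [PySem.List.foldl_prod_mk
        (f := fun (q : PySem.Set Char) ch => PySem.Set.add q ch)
        (g := fun (q : PySem.Set Char) ch =>
          if PySem.Set.contains q ch then PySem.Set.discard q ch else PySem.Set.add q ch)]
  have hseen : l.foldl (fun (q : PySem.Set Char) ch => PySem.Set.add q ch) PySem.Set.empty
      = PySem.Set.ofList l := (PySem.Set.ofList_eq_foldl l).symm
  obtain ⟨hn, hm⟩ := parity_invariant l PySem.Set.empty (by simp [PySem.Set.empty])
  have hperm : (l.foldl (fun (q : PySem.Set Char) ch =>
      if PySem.Set.contains q ch then PySem.Set.discard q ch else PySem.Set.add q ch) PySem.Set.empty).Perm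
      ((PySem.Set.ofList l).filter (fun c => decide (l.count c % 2 = 1))) := by
    rw [List.perm_ext_iff_of_nodup hn (List.Nodup.filter _ (PySem.Set.nodup_ofList l))]
    intro c
    rw [hm c]
    simp only [List.mem_filter, PySem.Set.mem_ofList, decide_eq_true_eq, PySem.Set.empty]
    constructor
    · intro h
      have hodd : l.count c % 2 = 1 := by
        rcases Nat.mod_two_eq_zero_or_one (l.count c) with h0 | h1
        · simp [h0] at h
        · exact h1
      have hpos : 0 < l.count c := by omega
      exact ⟨List.count_pos_iff.mp hpos, hodd⟩
    · rintro ⟨-, hodd⟩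
      simp [hodd]
  simp only [hseen, PySem.Set.len, hperm.length_eq]

-- A's value in closed form: the same quantity, as a count of even-frequency distinct chars.
theorem count_closed (s : String) :
    count s = (((PySem.Set.ofList s.toList).filter (fun c => decide (s.toList.count c % 2 = 0))).length : Int) := by
  unfold count
  set l := s.toList with hl
  rw [PySem.Dict.foldl_insert_getD_add_one_eq_counter]
  show (PySem.Dict.counter l).values.foldl
      (fun ans v => if PySem.Int.mod v 2 == 0 then ans + 1 else ans) 0 = _
  have hv : (PySem.Dict.counter l).values = (PySem.Set.ofList l).map (fun k => (l.count k : Int)) := by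
    show ((PySem.Dict.counter l).items.map (·.2)) = _
    rw [PySem.Dict.items_counter]
    simp [List.map_map, Function.comp]
  rw [hv]
  rw [PySem.List.foldl_if_add_one]
  rw [List.countP_map]
  simp only [zero_add, Nat.cast_inj]
  rw [← List.countP_eq_length_filter]
  apply List.countP_congr
  intro c _
  simp only [Function.comp_apply]
  have : PySem.Int.mod (l.count c : Int) 2 = ((l.count c % 2 : Nat) : Int) := by
    exact_mod_cast PySem.Int.mod_natCast (l.count c) 2
  rw [this]
  rcases Nat.mod_two_eq_zero_or_one (l.count c) with h | h <;> simp [h]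

theorem even_odd_split (l : List Char) :
    ((PySem.Set.ofList l).filter (fun c => decide (l.count c % 2 = 0))).length
      + ((PySem.Set.ofList l).filter (fun c => decide (l.count c % 2 = 1))).length
      = (PySem.Set.ofList l).length := by
  simp only [← List.countP_eq_length_filter]
  induction (PySem.Set.ofList l) with
  | nil => simp
  | cons a t ih =>
    rcases Nat.mod_two_eq_zero_or_one (l.count a) with h | h <;>
      simp [h] <;> omega

-- ===== VERDICT (by name: the statement is the Claim_ definition above) =====
theorem count_spec : Claim_equal_count := by
  intro s _
  unfold Spec_count
  rw [count_closed, count_alt_closed]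
  have := even_odd_split s.toList
  omega
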